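-- pv_equiv track=rewrite | github.com/Antoo22D/Exercisce_Python_UNIVERSITY | N24.py | sottoseq
-- ===== SOURCE A (Python) =====
-- def sottoseq(stringa,somma):
--     vocali="aeiou"
--     if len(stringa)==0:
--         return 0
--     for i in range(len(stringa)-1):
--         if (stringa[i]in vocali and stringa[i+1] in vocali) or (stringa[i]not in vocali and stringa[i+1]not in vocali):
--             somma+=1
--     return somma
-- ===== SOURCE B (Python) =====
-- def _runs(classes):
--     # Split the class list into maximal runs of equal values, returning the
--     # list of run lengths: repeatedly scan to the end of the current run.
--     runs = []
--     i = 0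
--     n = len(classes)
--     while i < n:
--         j = i + 1
--         while j < n and classes[j] == classes[i]:
--             j += 1
--         runs.append(j - i)
--         i = j
--     return runs
--
-- def sottoseq(stringa, somma):
--     # Staged group-then-count decomposition: map each character to its
--     # vowel-class, split that list into maximal runs, and sum L-1 per run
--     # (a run of length L has L-1 same-class adjacent pairs).
--     if len(stringa) == 0:
--         return 0
--     classes = [c in "aeiou" for c in stringa]
--     return somma + sum(L - 1 for L in _runs(classes))
-- ===== Notes on version B (the rewrite author's own statement) =====
-- stated objective: alternative
-- what changed: B is a staged group-then-count pass: it maps the string to a vowel-class list, splits that list into maximal equal-class runs (a run-length scan), and returns somma plus the sum of (run length - 1) over the runs, instead of A's index loop that tests each adjacent pair with four membership tests.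
import Mathlib
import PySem

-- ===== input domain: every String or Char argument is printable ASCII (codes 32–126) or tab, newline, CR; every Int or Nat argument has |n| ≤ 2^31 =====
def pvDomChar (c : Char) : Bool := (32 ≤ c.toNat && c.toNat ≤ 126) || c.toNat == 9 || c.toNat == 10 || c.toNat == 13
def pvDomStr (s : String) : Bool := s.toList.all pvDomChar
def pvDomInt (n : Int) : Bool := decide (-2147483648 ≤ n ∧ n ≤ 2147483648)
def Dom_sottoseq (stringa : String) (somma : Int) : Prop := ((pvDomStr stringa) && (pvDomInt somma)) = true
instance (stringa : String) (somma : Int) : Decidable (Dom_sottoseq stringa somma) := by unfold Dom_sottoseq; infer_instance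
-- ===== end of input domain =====

-- B replaces A's per-pair index loop with a staged group-then-count pass (class list -> maximal runs -> sum of L-1); same O(n) cost, different decomposition.


-- ===== PORT A =====
-- for i in range(len(stringa)-1): if same-class adjacent pair then somma += 1
-- (loop indices are always in range, so pyGetD with a dummy default is exact)
def sottoseq (stringa : String) (somma : Int) : Int :=
  let vocali := "aeiou".toList
  let cs := stringa.toList
  if cs.length = 0 then 0
  else
    (PySem.List.pyRange 0 ((cs.length : Int) - 1)).foldl
      (fun acc i =>
        let a := PySem.List.pyGetD cs i ' '
        let b := PySem.List.pyGetD cs (i + 1) ' '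
        if (vocali.contains a && vocali.contains b) ||
           (!vocali.contains a && !vocali.contains b) then acc + 1 else acc)
      somma

-- ===== PORT B =====
-- _runs: peel off the first maximal run of equal class values, recurse on the rest
-- (the Python while loop computing k is the takeWhile/dropWhile split)
def runsB : List Bool → List Nat
  | [] => []
  | b :: t =>
    (( t.takeWhile (· == b)).length + 1) :: runsB (t.dropWhile (· == b))
termination_by l => l.length
decreasing_by
  have := List.length_dropWhile_le (· == b) t
  simp
  omega

def sottoseq_alt (stringa : String) (somma : Int) : Int :=
  if stringa.toList.length = 0 then 0
  else
    let classes := stringa.toList.map (fun c => "aeiou".toList.contains c)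
    somma + ((runsB classes).map (fun L => (Int.ofNat L) - 1)).sum

-- ===== PRECONDITION & SPEC =====
def Spec_sottoseq (stringa : String) (somma : Int) (out : Int) : Prop := out = sottoseq_alt stringa somma
instance (stringa : String) (somma : Int) (out : Int) : Decidable (Spec_sottoseq stringa somma out) := by unfold Spec_sottoseq; infer_instance

-- ===== CLAIM (what is proved, stated in full; the proofs are below) =====
def Claim_equal_sottoseq : Prop := ∀ (stringa : String) (somma : Int), Dom_sottoseq stringa somma → Spec_sottoseq stringa somma (sottoseq stringa somma)

-- ===== LEMMAS AND PROOFS =====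

-- vowel class of a character (proof-side abbreviation for both ports' membership test)
def isV (c : Char) : Bool := "aeiou".toList.contains c

-- number of adjacent equal pairs in a class list
def sameCb : List Bool → Int
  | a :: b :: t => (if a == b then 1 else 0) + sameCb (b :: t)
  | _ => 0

-- A's loop body as an index sum over the character list
theorem sumInd (cs : List Char) :
    ((List.range (cs.length - 1)).map
      (fun i => if isV (cs.getD i ' ') == isV (cs.getD (i + 1) ' ') then (1 : Int) else 0)).sum
      = sameCb (cs.map isV) := by
  induction cs with
  | nil => simp [sameCb]
  | cons a t ih =>
    cases t with
    | nil => simp [sameCb]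
    | cons b t2 =>
      have hlen : (a :: b :: t2).length - 1 = ((b :: t2).length - 1) + 1 := by simp
      rw [hlen, List.range_succ_eq_map]
      simp only [List.map_cons, List.map_map, List.sum_cons, sameCb]
      have hshift : ((List.range ((b :: t2).length - 1)).map
          ((fun i => if isV ((a :: b :: t2).getD i ' ') == isV ((a :: b :: t2).getD (i + 1) ' ')
              then (1 : Int) else 0) ∘ Nat.succ)).sum
          = ((List.range ((b :: t2).length - 1)).map
          (fun i => if isV ((b :: t2).getD i ' ') == isV ((b :: t2).getD (i + 1) ' ')
              then (1 : Int) else 0)).sum := by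
        apply congrArg
        apply List.map_congr_left
        intro i _
        simp [Function.comp, List.getD]
      rw [hshift, ih]
      simp [List.getD]

-- A computes somma + sameCb of the class list
theorem sottoseq_eq (stringa : String) (somma : Int) (h : stringa.toList ≠ []) :
    sottoseq stringa somma = somma + sameCb (stringa.toList.map isV) := by
  unfold sottoseq
  set cs := stringa.toList with hcs
  have hn : cs.length ≠ 0 := by simpa using h
  simp only [if_neg hn]
  have hcast : (cs.length : Int) - 1 = ((cs.length - 1 : Nat) : Int) := by omega
  rw [hcast, PySem.List.pyRange_zero_natCast, List.foldl_map]
  have hbody : (fun (acc : Int) (k : Nat) =>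
      let a := PySem.List.pyGetD cs ((k : Int)) ' '
      let b := PySem.List.pyGetD cs ((k : Int) + 1) ' '
      if ("aeiou".toList.contains a && "aeiou".toList.contains b) ||
         (!"aeiou".toList.contains a && !"aeiou".toList.contains b) then acc + 1 else acc)
      = (fun (acc : Int) (k : Nat) =>
        acc + (if isV (cs.getD k ' ') == isV (cs.getD (k + 1) ' ') then (1 : Int) else 0)) := by
    funext acc k
    have h1 : ((k : Int) + 1) = ((k + 1 : Nat) : Int) := by push_cast; ring
    rw [h1]
    simp only [PySem.List.pyGetD_natCast, isV]
    rcases Bool.eq_false_or_eq_true ("aeiou".toList.contains (cs.getD k ' ')) with hA | hA <;>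
      rcases Bool.eq_false_or_eq_true ("aeiou".toList.contains (cs.getD (k + 1) ' ')) with hB | hB <;>
        simp only [hA, hB] <;> simp
  rw [hbody, PySem.List.foldl_add, sumInd]

-- sameCb across a constant run b::tw followed by dw whose head differs from b
theorem sameCb_run (b : Bool) : ∀ (tw : List Bool), (∀ x ∈ tw, x = b) →
    ∀ (dw : List Bool), (∀ y, dw.head? = some y → y ≠ b) →
    sameCb (b :: (tw ++ dw)) = (tw.length : Int) + sameCb dw := by
  intro tw
  induction tw with
  | nil =>
    intro _ dw hdw
    cases dw with
    | nil => simp [sameCb]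
    | cons y t =>
      have hy : y ≠ b := hdw y rfl
      have hby : (b == y) = false := by
        simp only [beq_eq_false_iff_ne]
        exact fun e => hy e.symm
      simp [sameCb, hby]
  | cons a tw' ih =>
    intro htw dw hdw
    have ha : a = b := htw a (by simp)
    subst ha
    have h' : ∀ x ∈ tw', x = a := fun x hx => htw x (by simp [hx])
    simp only [List.cons_append, sameCb, List.length_cons]
    rw [ih h' dw hdw]
    simp only [beq_self_eq_true, if_true]
    push_cast
    ring

-- sum of (L-1) over the run lengths equals the same-class pair count
theorem runs_sum : ∀ (l : List Bool),
    ((runsB l).map (fun L => (Int.ofNat L) - 1)).sum = sameCb l := by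
  intro l
  induction l using runsB.induct with
  | case1 => simp [runsB, sameCb]
  | case2 b t ih =>
    rw [runsB, List.map_cons, List.sum_cons, ih]
    have hsplit : t = t.takeWhile (· == b) ++ t.dropWhile (· == b) :=
      (List.takeWhile_append_dropWhile).symm
    have htw : ∀ x ∈ t.takeWhile (· == b), x = b := by
      intro x hx
      have := List.mem_takeWhile_imp hx
      simpa using this
    have hdw : ∀ y, (t.dropWhile (· == b)).head? = some y → y ≠ b := by
      intro y hy
      have := List.head?_dropWhile_not (· == b) t
      rw [hy] at this
      simpa using this
    calc ((t.takeWhile (· == b)).length + 1 : Int) - 1 + sameCb (t.dropWhile (· == b))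
        = ((t.takeWhile (· == b)).length : Int) + sameCb (t.dropWhile (· == b)) := by ring
      _ = sameCb (b :: (t.takeWhile (· == b) ++ t.dropWhile (· == b))) :=
          (sameCb_run b _ htw _ hdw).symm
      _ = sameCb (b :: t) := by rw [← hsplit]

-- B computes somma + sameCb of the class list
theorem sottoseq_alt_eq (stringa : String) (somma : Int) (h : stringa.toList ≠ []) :
    sottoseq_alt stringa somma = somma + sameCb (stringa.toList.map isV) := by
  unfold sottoseq_alt
  have hn : stringa.toList.length ≠ 0 := by simpa using h
  simp only [if_neg hn]
  rw [runs_sum]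
  rfl

-- ===== VERDICT (by name: the statement is the Claim_ definition above) =====
theorem sottoseq_spec : Claim_equal_sottoseq := by
  intro stringa somma _
  unfold Spec_sottoseq
  by_cases h : stringa.toList = []
  · unfold sottoseq sottoseq_alt
    simp [h]
  · rw [sottoseq_eq _ _ h, sottoseq_alt_eq _ _ h]
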